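-- pv_equiv track=rewrite | github.com/mikecat/ctf-writeups | 2023/20230506_SDCTF_2023/REVENGE/Open_Sesame_100/gauss.py | gencave
-- ===== SOURCE A (Python) =====
-- MOD = 131
--
-- def gencave(flaglen):
-- 	cave = []
-- 	ps = []
-- 	i = 1
-- 	while len(cave) <= flaglen:
-- 		i += 1
-- 		skip = False
-- 		for p in ps:
-- 			if i % p == 0:
-- 				skip = True
-- 		if skip:
-- 			pass
-- 		else:
-- 			ps.append(i)
-- 			if not cave or len(cave[-1]) >= flaglen:
-- 				cave.append([])
-- 			cave[-1].append(i % MOD)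
-- 	cave = cave[:-1]
-- 	return cave
-- ===== SOURCE B (Python) =====
-- MOD = 131
--
--
-- def gencave(flaglen):
--     # Generate the first flaglen**2 primes by trial division against found
--     # primes only up to sqrt(candidate) (early break), then chunk into rows.
--     if flaglen <= 0:
--         return []
--     target = flaglen * flaglen
--     primes = []
--     cand = 1
--     while len(primes) < target:
--         cand += 1
--         isp = True
--         for p in primes:
--             if p * p > cand:
--                 break
--             if cand % p == 0:
--                 isp = False
--                 break
--         if isp:
--             primes.append(cand)
--     cave = []
--     row = []
--     for p in primes:
--         row.append(p % MOD)
--         if len(row) == flaglen: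
--             cave.append(row)
--             row = []
--     return cave
-- ===== Notes on version B (the rewrite author's own statement) =====
-- stated objective: faster
-- what changed: B tests each candidate only against found primes up to sqrt(candidate) with early break (A divides by every found prime with no break), generates exactly flaglen^2 primes as a flat list, and chunks them into rows in a separate single pass (A interleaves 2D cave building, over-generates one extra prime and drops the last row).
import Mathlib
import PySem

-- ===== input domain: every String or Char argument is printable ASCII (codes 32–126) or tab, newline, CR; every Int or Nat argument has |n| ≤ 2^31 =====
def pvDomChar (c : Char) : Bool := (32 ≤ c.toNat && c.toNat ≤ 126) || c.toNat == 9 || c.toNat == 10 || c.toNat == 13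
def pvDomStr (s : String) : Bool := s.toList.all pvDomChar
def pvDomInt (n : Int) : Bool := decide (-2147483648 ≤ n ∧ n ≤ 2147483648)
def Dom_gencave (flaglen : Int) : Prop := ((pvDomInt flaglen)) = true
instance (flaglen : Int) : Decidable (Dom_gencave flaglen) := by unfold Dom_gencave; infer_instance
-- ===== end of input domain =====

-- B replaces A's divide-by-every-found-prime test by trial division only up to
-- sqrt(candidate) with early break, collects exactly flaglen^2 primes flat and
-- chunks them into rows in a separate pass.

-- ===== PORT A =====
-- if not cave or len(cave[-1]) >= flaglen: cave.append([])
-- cave[-1].append(i % MOD)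
def caveAppendA (flaglen : Int) (cave : List (List Int)) (i2 : Int) : List (List Int) :=
  let cave2 := if cave.isEmpty || decide (flaglen ≤ ((cave.getLastD []).length : Int)) then cave ++ [([] : List Int)] else cave
  cave2.dropLast ++ [cave2.getLastD [] ++ [i2 % 131]]

-- Python A's while-loop; `fuel` is only a totality guard (each iteration does
-- i += 1, and the sufficiency lemmas below show 2^(flaglen^2+2) steps always
-- reach the loop's exit condition, so the 0-fuel branch is never taken).
def gencaveLoopA (flaglen : Int) : Nat → Int → List Int → List (List Int) → List (List Int)
  | 0, _, _, cave => cave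
  | fuel+1, i, ps, cave =>
    if (cave.length : Int) ≤ flaglen then            -- while len(cave) <= flaglen
      let i2 := i + 1                                 -- i += 1
      -- for p in ps: if i % p == 0: skip = True      (no break in A)
      let skip := ps.foldl (fun s p => if i2 % p == 0 then true else s) false
      if skip then
        gencaveLoopA flaglen fuel i2 ps cave
      else
        gencaveLoopA flaglen fuel i2 (ps ++ [i2]) (caveAppendA flaglen cave i2)
    else cave

def gencave (flaglen : Int) : List (List Int) :=
  -- cave = cave[:-1]
  PySem.List.slice (gencaveLoopA flaglen (2 ^ (flaglen.toNat * flaglen.toNat + 2)) 1 [] []) none (some (-1))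

-- ===== PORT B =====
-- for p in primes: if p*p > cand: break; if cand % p == 0: isp = False; break
def isPrimeTrialB (cand : Int) : List Int → Bool
  | [] => true
  | p :: rest =>
    if cand < p * p then true
    else if cand % p == 0 then false
    else isPrimeTrialB cand rest

-- B's while-loop; same totality-guard fuel as A's port.
def genPrimesB (target : Int) : Nat → Int → List Int → List Int
  | 0, _, primes => primes
  | fuel+1, cand, primes =>
    if (primes.length : Int) < target then           -- while len(primes) < target
      let c2 := cand + 1                             -- cand += 1
      if isPrimeTrialB c2 primes then genPrimesB target fuel c2 (primes ++ [c2])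
      else genPrimesB target fuel c2 primes
    else primes

-- row.append(p % MOD); if len(row) == flaglen: cave.append(row); row = []
def chunkStepB (flaglen : Int) (st : List (List Int) × List Int) (p : Int) : List (List Int) × List Int :=
  let row := st.2 ++ [p % 131]
  if (row.length : Int) == flaglen then (st.1 ++ [row], ([] : List Int)) else (st.1, row)

def gencave_alt (flaglen : Int) : List (List Int) :=
  if flaglen ≤ 0 then []
  else
    let primes := genPrimesB (flaglen * flaglen) (2 ^ (flaglen.toNat * flaglen.toNat + 2)) 1 []
    (primes.foldl (chunkStepB flaglen) ([], [])).1

-- ===== PRECONDITION & SPEC =====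
def Spec_gencave (flaglen : Int) (out : List (List Int)) : Prop := out = gencave_alt flaglen
instance (flaglen : Int) (out : List (List Int)) : Decidable (Spec_gencave flaglen out) := by unfold Spec_gencave; infer_instance

-- ===== CLAIM (what is proved, stated in full; the proofs are below) =====
def Claim_equal_gencave : Prop := ∀ (flaglen : Int), Dom_gencave flaglen → Spec_gencave flaglen (gencave flaglen)

-- ===== LEMMAS AND PROOFS =====

-- A's cave state, recovered from B's (full rows, partial row) chunking state.
def pvCaveOf (st : List (List Int) × List Int) : List (List Int) :=
  if st.2 = [] then st.1 else st.1 ++ [st.2]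

-- Loop invariant shared by both loops: ps collects values in (1, i], contains
-- every prime in that range, and is strictly increasing.
def pvInv (i : Int) (ps : List Int) : Prop :=
  1 ≤ i ∧ (∀ p ∈ ps, 2 ≤ p ∧ p ≤ i) ∧
    (∀ q : Int, 2 ≤ q → q ≤ i → q.natAbs.Prime → q ∈ ps) ∧ ps.Pairwise (· < ·)

-- A's skip flag is an ∃ over ps.
lemma pvSkipEq (i2 : Int) : ∀ (ps : List Int) (b : Bool),
    ps.foldl (fun s p => if i2 % p == 0 then true else s) b
      = (b || ps.any (fun p => i2 % p == 0)) := by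
  intro ps
  induction ps with
  | nil => intro b; simp
  | cons p rest ih =>
      intro b
      simp only [List.foldl_cons, List.any_cons, ih]
      by_cases h : i2 % p == 0 <;> simp [h]

-- B's early-breaking trial division, on a sorted list of values ≥ 2, fails
-- exactly when some listed p with p^2 ≤ cand divides cand.
lemma pvTrialFalseIff (c : Int) : ∀ (ps : List Int), (∀ p ∈ ps, 2 ≤ p) → ps.Pairwise (· < ·) →
    (isPrimeTrialB c ps = false ↔ ∃ p ∈ ps, p * p ≤ c ∧ c % p = 0) := by
  intro ps
  induction ps with
  | nil => intro _ _; simp [isPrimeTrialB]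
  | cons p rest ih =>
      intro hpos hsort
      have hp2 : 2 ≤ p := hpos p (List.mem_cons_self ..)
      rw [List.pairwise_cons] at hsort
      simp only [isPrimeTrialB]
      by_cases h1 : c < p * p
      · simp only [if_pos h1]
        constructor
        · intro h; exact absurd h (by simp)
        · rintro ⟨q, hq, hq2, _⟩
          exfalso
          have hpq : p ≤ q := by
            rcases List.mem_cons.mp hq with rfl | hq'
            · exact le_refl _
            · exact le_of_lt (hsort.1 q hq')
          have : p * p ≤ q * q :=
            mul_le_mul hpq hpq (by omega) (by omega)
          omega
      · simp only [if_neg h1]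
        rw [not_lt] at h1
        by_cases h2 : c % p = 0
        · simp only [show (c % p == 0) = true by simpa using h2]
          constructor
          · intro _; exact ⟨p, List.mem_cons_self .., h1, h2⟩
          · intro _; rfl
        · have hbeq : (c % p == 0) = false := by simpa using h2
          rw [hbeq]
          simp only [Bool.false_eq_true, if_false]
          rw [ih (fun q hq => hpos q (List.mem_cons_of_mem _ hq)) hsort.2]
          constructor
          · rintro ⟨q, hq, h⟩; exact ⟨q, List.mem_cons_of_mem _ hq, h⟩
          · rintro ⟨q, hq, hq1, hq2⟩
            rcases List.mem_cons.mp hq with rfl | hq'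
            · exact absurd hq2 h2
            · exact ⟨q, hq', hq1, hq2⟩

-- A divisor 2 ≤ p < n of n kills primality (stated on natAbs).
lemma pvNotPrimeOfDiv (n p : Int) (h2 : 2 ≤ p) (hlt : p < n) (hd : n % p = 0) :
    ¬ n.natAbs.Prime := by
  intro hpr
  have hdvd : p ∣ n := Int.dvd_of_emod_eq_zero hd
  have hdvd' : p.natAbs ∣ n.natAbs := Int.natAbs_dvd_natAbs.mpr hdvd
  rcases (Nat.Prime.eq_one_or_self_of_dvd hpr _ hdvd') with h | h <;> omega

-- If some element of ps divides i2, then some element m of ps with m^2 ≤ i2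
-- divides i2 (take the least prime factor of i2; completeness puts it in ps).
lemma pvSkipTrial (i2 : Int) (ps : List Int) (hub : ∀ p ∈ ps, 2 ≤ p ∧ p < i2)
    (hcomp : ∀ q : Int, 2 ≤ q → q < i2 → q.natAbs.Prime → q ∈ ps)
    (p : Int) (hp : p ∈ ps) (hd : i2 % p = 0) :
    ∃ m ∈ ps, m * m ≤ i2 ∧ i2 % m = 0 := by
  obtain ⟨hp2, hpi⟩ := hub p hp
  have hi2 : 0 < i2 := by omega
  set n := i2.natAbs with hn
  set a := p.natAbs with ha
  have hcastn : (n : Int) = i2 := Int.natAbs_of_nonneg (by omega)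
  have hcasta : (a : Int) = p := Int.natAbs_of_nonneg (by omega)
  have ha2 : 2 ≤ a := by omega
  have han : a < n := by omega
  have hdvd : a ∣ n := Int.natAbs_dvd_natAbs.mpr (Int.dvd_of_emod_eq_zero hd)
  set m := n.minFac with hm
  have hn1 : n ≠ 1 := by omega
  have hmp : m.Prime := Nat.minFac_prime hn1
  have hmdvd : m ∣ n := Nat.minFac_dvd n
  have hma : m ≤ a := Nat.minFac_le_of_dvd ha2 hdvd
  -- m * m ≤ n via the cofactor k = n / m
  set k := n / m with hk
  have hnk : m * k = n := Nat.mul_div_cancel' hmdvd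
  have hk2 : 2 ≤ k := by
    rcases Nat.lt_or_ge k 2 with hlt | hge
    · interval_cases k <;> omega
    · exact hge
  have hkdvd : k ∣ n := Dvd.intro_left m hnk
  have hmk : m ≤ k := by
    have h1 : k.minFac ∣ n := dvd_trans (Nat.minFac_dvd k) hkdvd
    have h2 : 2 ≤ k.minFac := (Nat.minFac_prime (by omega)).two_le
    have h3 : m ≤ k.minFac := Nat.minFac_le_of_dvd h2 h1
    have h4 : k.minFac ≤ k := Nat.minFac_le (by omega)
    omega
  have hmm : m * m ≤ n := le_trans (Nat.mul_le_mul_left m hmk) (le_of_eq hnk)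
  have hmem : ((m : Int)) ∈ ps := by
    apply hcomp m (by exact_mod_cast hmp.two_le) (by omega) (by simpa using hmp)
  refine ⟨(m : Int), hmem, ?_, ?_⟩
  · have : ((m * m : ℕ) : Int) ≤ (n : Int) := by exact_mod_cast hmm
    push_cast at this; omega
  · have : ((m : ℕ) : Int) ∣ i2 := by
      rw [← hcastn]; exact_mod_cast hmdvd
    exact Int.emod_eq_zero_of_dvd this

-- Shape facts about B's chunking fold: full rows of length F, partial row < F,
-- and the count of consumed elements.
lemma pvChunkFacts (F : Int) (hF : 1 ≤ F) (l : List Int) :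
    (∀ r ∈ (l.foldl (chunkStepB F) ([], [])).1, (r.length : Int) = F) ∧
    ((l.foldl (chunkStepB F) ([], [])).2.length : Int) < F ∧
    (l.length : Int) = F * (l.foldl (chunkStepB F) ([], [])).1.length
      + (l.foldl (chunkStepB F) ([], [])).2.length := by
  induction l using List.reverseRecOn with
  | nil => simp; omega
  | append_singleton l x ih =>
      obtain ⟨h1, h2, h3⟩ := ih
      rw [List.foldl_append]
      simp only [List.foldl_cons, List.foldl_nil]
      set st := l.foldl (chunkStepB F) ([], []) with hst
      simp only [chunkStepB]
      split
      next hflush =>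
        have hflush' : ((st.2.length : Int) + 1) = F := by
          simpa [List.length_append] using hflush
        refine ⟨?_, by simpa using hF, ?_⟩
        · intro r hr
          rcases List.mem_append.mp hr with h | h
          · exact h1 r h
          · simp only [List.mem_singleton] at h
            subst h
            simp [List.length_append]
            omega
        · simp only [List.length_append, List.length_cons, List.length_nil]
          push_cast
          have : (F : Int) * ((st.1.length : Int) + 1) = F * st.1.length + F := by ring
          linarith [h3]
      next hflush =>
        have hflush' : ((st.2.length : Int) + 1) ≠ F := by
          intro h; apply hflush; simp [List.length_append]; omega
        refine ⟨h1, ?_, ?_⟩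
        · simp only [List.length_append, List.length_cons, List.length_nil]
          push_cast
          omega
        · simp only [List.length_append, List.length_cons, List.length_nil]
          push_cast
          linarith [h3]

-- A's two cave-update lines simulate one step of B's chunking fold.
lemma pvCaveStep (F : Int) (_hF : 1 ≤ F) (st : List (List Int) × List Int)
    (hrows : ∀ r ∈ st.1, (r.length : Int) = F) (hrow : (st.2.length : Int) < F) (x : Int) :
    caveAppendA F (pvCaveOf st) x = pvCaveOf (chunkStepB F st x) := by
  obtain ⟨out, row⟩ := st
  by_cases hrow0 : row = ([] : List Int)
  · subst hrow0
    have hcave : pvCaveOf (out, ([] : List Int)) = out := by simp [pvCaveOf]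
    have hres : pvCaveOf (chunkStepB F (out, ([] : List Int)) x) = out ++ [[x % 131]] := by
      simp only [chunkStepB]
      split
      · simp [pvCaveOf]
      · simp [pvCaveOf]
    rw [hcave, hres]
    rcases List.eq_nil_or_concat out with rfl | ⟨ys, y, rfl⟩
    · simp [caveAppendA]
    · simp only [List.concat_eq_append] at hrows hcave hres ⊢
      have hy : (y.length : Int) = F := hrows y (by simp)
      unfold caveAppendA
      have hcond : ((ys ++ [y]).isEmpty || decide (F ≤ (((ys ++ [y]).getLastD []).length : Int))) = true := by
        have h2 : (ys ++ [y]).getLastD [] = y := by simp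
        rw [h2]
        simp [hy]
      rw [if_pos hcond]
      simp
  · have hcave : pvCaveOf (out, row) = out ++ [row] := by simp [pvCaveOf, hrow0]
    have hres : pvCaveOf (chunkStepB F (out, row) x) = out ++ [row ++ [x % 131]] := by
      simp only [chunkStepB]
      split
      · simp [pvCaveOf]
      · simp only [pvCaveOf]
        rw [if_neg (by simp)]
    rw [hcave, hres]
    unfold caveAppendA
    have hrl : (row.length : Int) < F := by simpa using hrow
    rw [if_neg (by simp; omega)]
    simp

lemma pvStopA (F : Int) (fuel : ℕ) (i : Int) (ps : List Int) (cave : List (List Int))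
    (h : ¬ ((cave.length : Int) ≤ F)) : gencaveLoopA F fuel i ps cave = cave := by
  cases fuel <;> simp [gencaveLoopA, h]

lemma pvStopB (t : Int) (fuel : ℕ) (i : Int) (ps : List Int)
    (h : ¬ ((ps.length : Int) < t)) : genPrimesB t fuel i ps = ps := by
  cases fuel <;> simp [genPrimesB, h]

-- One i-step eats at most the single candidate i+1 from the prime reservoir.
lemma pvCardDrop (i : Int) (fuel : ℕ) :
    ((Finset.Icc (i + 1) (i + (fuel + 1 : ℕ))).filter (fun q : ℤ => q.natAbs.Prime)).card
      ≤ ((Finset.Icc (i + 1 + 1) (i + 1 + (fuel : ℕ))).filter (fun q : ℤ => q.natAbs.Prime)).card + 1 := by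
  have hsub : (Finset.Icc (i + 1) (i + (fuel + 1 : ℕ))).filter (fun q : ℤ => q.natAbs.Prime)
      ⊆ insert (i + 1) ((Finset.Icc (i + 1 + 1) (i + 1 + (fuel : ℕ))).filter (fun q : ℤ => q.natAbs.Prime)) := by
    intro q hq
    simp only [Finset.mem_filter, Finset.mem_Icc, Finset.mem_insert] at hq ⊢
    push_cast at hq ⊢
    rcases eq_or_ne q (i + 1) with rfl | hne
    · exact Or.inl rfl
    · exact Or.inr ⟨⟨by omega, by omega⟩, hq.2⟩
  calc ((Finset.Icc (i + 1) (i + (fuel + 1 : ℕ))).filter (fun q : ℤ => q.natAbs.Prime)).card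
      ≤ (insert (i + 1) ((Finset.Icc (i + 1 + 1) (i + 1 + (fuel : ℕ))).filter (fun q : ℤ => q.natAbs.Prime))).card :=
        Finset.card_le_card hsub
    _ ≤ _ := Finset.card_insert_le _ _

lemma pvCardKeep (i : Int) (fuel : ℕ) (h : ¬ (i + 1).natAbs.Prime) :
    ((Finset.Icc (i + 1) (i + (fuel + 1 : ℕ))).filter (fun q : ℤ => q.natAbs.Prime)).card
      ≤ ((Finset.Icc (i + 1 + 1) (i + 1 + (fuel : ℕ))).filter (fun q : ℤ => q.natAbs.Prime)).card := by
  apply Finset.card_le_card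
  intro q hq
  simp only [Finset.mem_filter, Finset.mem_Icc] at hq ⊢
  push_cast at hq ⊢
  have hne : q ≠ i + 1 := by rintro rfl; exact h hq.2
  exact ⟨⟨by omega, by omega⟩, hq.2⟩

-- Bertrand ⇒ k primes below 2^(k+1).
lemma pvPrimesLower : ∀ k : ℕ, ∃ S : Finset ℤ, S.card = k ∧
    ∀ q ∈ S, q.natAbs.Prime ∧ 2 ≤ q ∧ q ≤ 2 ^ (k + 1) := by
  intro k
  induction k with
  | zero => exact ⟨∅, by simp, by simp⟩
  | succ k ih =>
      obtain ⟨S, hcard, hS⟩ := ih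
      obtain ⟨p, hp, hlt, hle⟩ := Nat.exists_prime_lt_and_le_two_mul (2 ^ (k + 1)) (by positivity)
      have hltZ : ((2 : ℤ)) ^ (k + 1) < (p : ℤ) := by exact_mod_cast hlt
      refine ⟨insert ((p : ℤ)) S, ?_, ?_⟩
      · rw [Finset.card_insert_of_notMem, hcard]
        intro hmem
        have := (hS _ hmem).2.2
        linarith
      · intro q hq
        rcases Finset.mem_insert.mp hq with rfl | hq'
        · refine ⟨by simpa using hp, by exact_mod_cast hp.two_le, ?_⟩
          have hleZ : (p : ℤ) ≤ 2 * 2 ^ (k + 1) := by exact_mod_cast hle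
          calc (p : ℤ) ≤ 2 * 2 ^ (k + 1) := hleZ
            _ = 2 ^ (k + 1 + 1) := by ring
        · obtain ⟨h1, h2, h3⟩ := hS q hq'
          refine ⟨h1, h2, le_trans h3 ?_⟩
          have : (0 : ℤ) < 2 ^ (k + 1) := by positivity
          calc ((2 : ℤ)) ^ (k + 1) ≤ 2 * 2 ^ (k + 1) := by linarith
            _ = 2 ^ (k + 1 + 1) := by ring

-- Main lockstep simulation of the two while-loops.
lemma pvSim (F : Int) (hF : 1 ≤ F) :
    ∀ (fuel : ℕ) (i : Int) (ps : List Int),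
      pvInv i ps → (ps.length : Int) ≤ F * F →
      ((F * F).toNat + 1
        ≤ ((Finset.Icc (i + 1) (i + (fuel : ℕ))).filter (fun q : ℤ => q.natAbs.Prime)).card + ps.length) →
      (gencaveLoopA F fuel i ps (pvCaveOf (ps.foldl (chunkStepB F) ([], [])))).dropLast
        = ((genPrimesB (F * F) fuel i ps).foldl (chunkStepB F) ([], [])).1 := by
  have hFF0 : (0 : ℤ) ≤ F * F := by positivity
  have hFFc : (((F * F).toNat : ℕ) : ℤ) = F * F := Int.toNat_of_nonneg hFF0
  intro fuel
  induction fuel with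
  | zero =>
      intro i ps hinv hle hsuff
      exfalso
      have hempty : (Finset.Icc (i + 1) (i + ((0 : ℕ) : ℤ))) = ∅ := by
        apply Finset.Icc_eq_empty; push_cast; omega
      rw [hempty] at hsuff
      simp only [Finset.filter_empty, Finset.card_empty, zero_add] at hsuff
      have hle' : (ps.length : ℤ) ≤ (((F * F).toNat : ℕ) : ℤ) := by rw [hFFc]; exact hle
      have := Nat.cast_le.mp hle'
      omega
  | succ fuel ih =>
      intro i ps hinv hle hsuff
      obtain ⟨hi1, hub, hcomp, hsort⟩ := hinv
      obtain ⟨hrows, hrowlt, hcount⟩ := pvChunkFacts F hF ps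
      set st := ps.foldl (chunkStepB F) ([], []) with hst
      have hguard : (((pvCaveOf st).length : ℕ) : Int) ≤ F := by
        unfold pvCaveOf
        split
        next h2 =>
          rw [h2] at hcount
          simp only [List.length_nil, Nat.cast_zero, add_zero] at hcount
          have hmul : F * ((st.1.length : ℕ) : ℤ) ≤ F * F := by rw [← hcount]; exact hle
          exact le_of_mul_le_mul_left hmul (by omega)
        next h2 =>
          have hr1 : 1 ≤ ((st.2.length : ℕ) : ℤ) := by
            have := List.length_pos_iff.mpr h2
            exact_mod_cast this
          have hmul : F * ((st.1.length : ℕ) : ℤ) < F * F := by linarith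
          have ho : ((st.1.length : ℕ) : ℤ) < F := lt_of_mul_lt_mul_left hmul (by omega)
          simp only [List.length_append, List.length_cons, List.length_nil]
          push_cast
          omega
      simp only [gencaveLoopA]
      rw [if_pos hguard]
      by_cases hskip : (ps.foldl (fun s p => if (i + 1) % p == 0 then true else s) false) = true
      · rw [if_pos hskip]
        have hex : ∃ p ∈ ps, (i + 1) % p = 0 := by
          rw [pvSkipEq (i + 1) ps false] at hskip
          simp only [Bool.false_or, List.any_eq_true, beq_iff_eq] at hskip
          exact hskip
        have hnp : ¬ (i + 1).natAbs.Prime := by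
          obtain ⟨p, hp, hd⟩ := hex
          exact pvNotPrimeOfDiv _ p (hub p hp).1 (by have := (hub p hp).2; omega) hd
        have htrial : isPrimeTrialB (i + 1) ps = false := by
          rw [pvTrialFalseIff (i + 1) ps (fun p hp => (hub p hp).1) hsort]
          obtain ⟨p, hp, hd⟩ := hex
          exact pvSkipTrial (i + 1) ps
            (fun p hp => ⟨(hub p hp).1, by have := (hub p hp).2; omega⟩)
            (fun q h2 hq hpr => hcomp q h2 (by omega) hpr) p hp hd
        have hB : genPrimesB (F * F) (fuel + 1) i ps = genPrimesB (F * F) fuel (i + 1) ps := by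
          by_cases hlt : (ps.length : Int) < F * F
          · simp [genPrimesB, hlt, htrial]
          · rw [pvStopB _ _ _ _ hlt, pvStopB _ _ _ _ hlt]
        rw [hB]
        apply ih (i + 1) ps
        · refine ⟨by omega, fun p hp => ⟨(hub p hp).1, by have := (hub p hp).2; omega⟩, ?_, hsort⟩
          intro q h2 hqi hpr
          rcases eq_or_lt_of_le hqi with rfl | hlt'
          · exact absurd hpr hnp
          · exact hcomp q h2 (by omega) hpr
        · exact hle
        · have := pvCardKeep i fuel hnp
          omega
      · rw [if_neg hskip]
        have htrial : isPrimeTrialB (i + 1) ps = true := by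
          cases h : isPrimeTrialB (i + 1) ps
          · exfalso
            rw [pvTrialFalseIff (i + 1) ps (fun p hp => (hub p hp).1) hsort] at h
            obtain ⟨p, hp, _, h2⟩ := h
            apply hskip
            rw [pvSkipEq (i + 1) ps false]
            simp only [Bool.false_or, List.any_eq_true, beq_iff_eq]
            exact ⟨p, hp, h2⟩
          · rfl
        rw [pvCaveStep F hF st hrows hrowlt (i + 1)]
        have hfold : (ps ++ [i + 1]).foldl (chunkStepB F) ([], []) = chunkStepB F st (i + 1) := by
          rw [List.foldl_append]; rfl
        by_cases hlt : (ps.length : Int) < F * F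
        · have hB : genPrimesB (F * F) (fuel + 1) i ps
              = genPrimesB (F * F) fuel (i + 1) (ps ++ [i + 1]) := by
            simp [genPrimesB, hlt, htrial]
          rw [hB, ← hfold]
          apply ih (i + 1) (ps ++ [i + 1])
          · refine ⟨by omega, ?_, ?_, ?_⟩
            · intro p hp
              rcases List.mem_append.mp hp with h | h
              · exact ⟨(hub p h).1, by have := (hub p h).2; omega⟩
              · simp only [List.mem_singleton] at h; subst h; omega
            · intro q h2 hqi hpr
              rcases eq_or_lt_of_le hqi with rfl | hlt'
              · exact List.mem_append.mpr (Or.inr (by simp))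
              · exact List.mem_append.mpr (Or.inl (hcomp q h2 (by omega) hpr))
            · rw [List.pairwise_append]
              exact ⟨hsort, List.pairwise_singleton _ _,
                fun a ha b hb => by
                  simp only [List.mem_singleton] at hb; subst hb
                  have := (hub a ha).2; omega⟩
          · simp only [List.length_append, List.length_cons, List.length_nil]
            push_cast
            omega
          · have := pvCardDrop i fuel
            simp only [List.length_append, List.length_cons, List.length_nil]
            omega
        · -- B already holds F*F primes: A finds one extra prime and exits
          have hps : (ps.length : Int) = F * F := le_antisymm hle (not_lt.mp hlt)
          have ho : ((st.1.length : ℕ) : ℤ) = F := by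
            nlinarith [hrowlt, hcount, hps, hF,
              show (0 : ℤ) ≤ (st.2.length : ℤ) from by positivity]
          have hr0 : st.2 = [] := by
            have : ((st.2.length : ℕ) : ℤ) = 0 := by
              have := hcount; rw [hps, ho] at this; linarith
            have : st.2.length = 0 := by exact_mod_cast this
            exact List.length_eq_zero_iff.mp this
          have hone : pvCaveOf (chunkStepB F st (i + 1)) = st.1 ++ [[(i + 1) % 131]] := by
            rw [show st = (st.1, st.2) from rfl, hr0]
            simp only [chunkStepB]
            split
            · simp [pvCaveOf]
            · simp [pvCaveOf]
          rw [hone]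
          rw [pvStopA F fuel (i + 1) (ps ++ [i + 1]) _ (by
            simp only [List.length_append, List.length_cons, List.length_nil]
            push_cast
            omega)]
          rw [pvStopB _ _ _ _ hlt]
          simp
          rw [hst]

-- ===== VERDICT (by name: the statement is the Claim_ definition above) =====
theorem gencave_spec : Claim_equal_gencave := by
  unfold Claim_equal_gencave
  intro flaglen _
  unfold Spec_gencave
  rcases le_or_gt flaglen 0 with hle | hpos
  · have hB : gencave_alt flaglen = [] := by unfold gencave_alt; rw [if_pos hle]
    rw [hB]
    rcases eq_or_lt_of_le hle with heq | hneg
    · subst heq; decide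
    · have ht : flaglen.toNat = 0 := Int.toNat_of_nonpos (le_of_lt hneg)
      unfold gencave
      rw [ht]
      have hloop : gencaveLoopA flaglen (2 ^ (0 * 0 + 2)) 1 [] [] = [] :=
        pvStopA flaglen _ 1 [] [] (by simp; omega)
      rw [hloop]
      rfl
  · unfold gencave gencave_alt
    rw [if_neg (by omega)]
    rw [PySem.List.slice_to_neg_one]
    have hM : flaglen.toNat * flaglen.toNat = (flaglen * flaglen).toNat := by
      have h0 : (0 : ℤ) ≤ flaglen := by omega
      have hcast : ((flaglen.toNat * flaglen.toNat : ℕ) : ℤ) = flaglen * flaglen := by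
        push_cast [Int.toNat_of_nonneg h0]; ring
      omega
    set N : ℕ := (flaglen * flaglen).toNat with hN
    have hsuff : N + 1
        ≤ ((Finset.Icc ((1 : ℤ) + 1) (1 + ((2 ^ (N + 2) : ℕ) : ℤ))).filter
            (fun q : ℤ => q.natAbs.Prime)).card + ([] : List Int).length := by
      obtain ⟨S, hcard, hS⟩ := pvPrimesLower (N + 1)
      have hsub : S ⊆ (Finset.Icc ((1 : ℤ) + 1) (1 + ((2 ^ (N + 2) : ℕ) : ℤ))).filter
          (fun q : ℤ => q.natAbs.Prime) := by
        intro q hq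
        obtain ⟨h1, h2, h3⟩ := hS q hq
        simp only [Finset.mem_filter, Finset.mem_Icc]
        refine ⟨⟨by omega, ?_⟩, h1⟩
        have : ((2 ^ (N + 2) : ℕ) : ℤ) = 2 ^ (N + 1 + 1) := by push_cast; ring
        omega
      have := Finset.card_le_card hsub
      simp only [List.length_nil]
      omega
    have hmain := pvSim flaglen hpos (2 ^ (N + 2)) 1 []
      ⟨le_refl 1, by simp, by intro q h2 h1 _; omega, List.Pairwise.nil⟩
      (by simp; positivity) hsuff
    rw [hM]
    simpa [pvCaveOf] using hmain
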